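-- pv_equiv track=rewrite | github.com/alice-njoroge/RATSTParserAPI | parser.py | _find_token
-- ===== SOURCE A (Python) =====
-- def _find_token(haystack: str, needle: str) -> int:
--     """
--     Like the string function find, but
--     ignores tokens that are within a string
--     literal.
--     """
--     r = -1
--     string = False
--     escape = False
--
--     for i in range(len(haystack)):
--         if haystack[i] == '\'' and not escape:
--             string = not string
--         if haystack[i] == '\\' and not escape:
--             escape = True
--         else:
--             escape = False
--         if string:
--             continue
--
--         if haystack[i:].startswith(needle):
--             return i
--     return r
-- ===== SOURCE B (Python) =====
-- def _find_token(haystack: str, needle: str) -> int: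
--     """
--     Like str.find, but ignores matches that start inside a
--     single-quoted string literal.
--     B: one pass builds an in-string-literal mask, then the search
--     jumps between candidate occurrences with the built-in str.find.
--     """
--     in_str = []
--     string = False
--     escape = False
--     for c in haystack:
--         if c == "'" and not escape:
--             string = not string
--         escape = (c == '\\') and not escape
--         in_str.append(string)
--
--     n = len(haystack)
--     pos = 0
--     while pos <= n:
--         i = haystack.find(needle, pos)
--         if i == -1:
--             return -1
--         if i < n and not in_str[i]:
--             return i
--         pos = i + 1
--     return -1
-- ===== Notes on version B (the rewrite author's own statement) =====
-- stated objective: alternative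
-- what changed: A checks every index with startswith while threading the literal/escape state; B first builds the in-string-literal mask in one pass and then jumps between candidate occurrences with the built-in str.find, testing only occurrence starts against the mask.
import Mathlib
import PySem

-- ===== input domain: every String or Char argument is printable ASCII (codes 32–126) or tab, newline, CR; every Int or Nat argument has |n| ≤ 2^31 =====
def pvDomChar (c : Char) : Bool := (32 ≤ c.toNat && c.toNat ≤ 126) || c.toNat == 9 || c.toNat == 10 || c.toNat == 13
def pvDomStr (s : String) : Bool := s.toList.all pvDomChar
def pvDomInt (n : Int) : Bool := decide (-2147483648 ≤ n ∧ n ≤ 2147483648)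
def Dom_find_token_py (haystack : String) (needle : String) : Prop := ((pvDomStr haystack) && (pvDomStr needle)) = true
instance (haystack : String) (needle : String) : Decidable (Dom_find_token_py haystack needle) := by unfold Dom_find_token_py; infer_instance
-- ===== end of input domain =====

-- B replaces A's check-every-index scan by a one-pass string-literal mask plus jumps
-- between occurrences found by the built-in str.find (alternative decomposition).

-- ===== PORT A =====
-- A's for-loop over range(len(haystack)) with early return, as structural recursion on the index.
def aGo (cs needle : List Char) (string escape : Bool) (i : Nat) : Int :=
  if h : i < cs.length then
    let c := cs[i]
    let string' := if c == '\'' && !escape then !string else string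
    let escape' := c == '\\' && !escape
    if string' then aGo cs needle string' escape' (i + 1)
    else if PySem.Chars.startswith (cs.drop i) needle then (i : Int)
    else aGo cs needle string' escape' (i + 1)
  else -1
termination_by cs.length - i

def find_token_py (haystack : String) (needle : String) : Int :=
  aGo haystack.toList needle.toList false false 0

-- ===== PORT B =====
-- B's first pass: the in-string-literal flag after each character.
def bMask (string escape : Bool) : List Char → List Bool
  | [] => []
  | c :: rest =>
    let string' := if c == '\'' && !escape then !string else string
    let escape' := c == '\\' && !escape
    string' :: bMask string' escape' rest

-- B's while-loop: jump between occurrences via str.find(needle, pos).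
def bSearch (cs needle : List Char) (mask : List Bool) (pos : Nat) : Int :=
  if hpos : pos ≤ cs.length then
    let r := PySem.Chars.findFrom cs needle (pos : Int) none
    if hr : r = -1 then -1
    else if r.toNat < cs.length ∧ mask.getD r.toNat true = false then (r.toNat : Int)
    else bSearch cs needle mask (r.toNat + 1)
  else -1
termination_by cs.length + 1 - pos
decreasing_by
  have h := (PySem.Chars.findFrom_natCast_spec cs needle pos hpos hr).1
  omega

def find_token_py_alt (haystack : String) (needle : String) : Int :=
  bSearch haystack.toList needle.toList (bMask false false haystack.toList) 0

-- ===== PRECONDITION & SPEC =====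
def Spec_find_token_py (haystack : String) (needle : String) (out : Int) : Prop := out = find_token_py_alt haystack needle
instance (haystack : String) (needle : String) (out : Int) : Decidable (Spec_find_token_py haystack needle out) := by unfold Spec_find_token_py; infer_instance

-- ===== CLAIM (what is proved, stated in full; the proofs are below) =====
def Claim_equal_find_token_py : Prop := ∀ (haystack : String) (needle : String), Dom_find_token_py haystack needle → Spec_find_token_py haystack needle (find_token_py haystack needle)

-- ===== LEMMAS AND PROOFS =====

-- Reference: first index i with mask[i] = false and needle a prefix of cs.drop i.
def fIdx (cs needle : List Char) (mask : List Bool) (i : Nat) : Int :=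
  if h : i < cs.length then
    if mask.getD i true = false ∧ needle <+: cs.drop i then (i : Int)
    else fIdx cs needle mask (i + 1)
  else -1
termination_by cs.length - i

theorem fIdx_skip (cs needle : List Char) (mask : List Bool) (j : Nat)
    (h : ¬ needle <+: cs.drop j) : fIdx cs needle mask j = fIdx cs needle mask (j + 1) := by
  by_cases hj : j < cs.length
  · rw [fIdx, dif_pos hj, if_neg (by tauto)]
  · rw [fIdx, dif_neg hj, fIdx, dif_neg (by omega)]

theorem fIdx_skip_range (cs needle : List Char) (mask : List Bool) (j k : Nat)
    (hjk : j ≤ k) (h : ∀ t, j ≤ t → t < k → ¬ needle <+: cs.drop t) :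
    fIdx cs needle mask j = fIdx cs needle mask k := by
  induction k with
  | zero => have : j = 0 := by omega
            rw [this]
  | succ k ih =>
    rcases Nat.lt_or_ge j (k+1) with hlt | hge
    · have hjk' : j ≤ k := by omega
      rw [ih hjk' (fun t ht1 ht2 => h t ht1 (by omega)),
        fIdx_skip cs needle mask k (h k hjk' (by omega))]
    · have : j = k + 1 := by omega
      rw [this]

theorem fIdx_none (cs needle : List Char) (mask : List Bool) (j : Nat)
    (h : ∀ t, j ≤ t → ¬ needle <+: cs.drop t) : fIdx cs needle mask j = -1 := by
  by_cases hj : j ≤ cs.length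
  · rw [fIdx_skip_range cs needle mask j cs.length hj (fun t ht1 _ => h t ht1),
      fIdx, dif_neg (by omega)]
  · rw [fIdx, dif_neg (by omega)]

-- A's loop computes fIdx, given that the incoming state matches the mask tail.
theorem aGo_eq_fIdx (cs needle : List Char) (mask : List Bool) (i : Nat)
    (string escape : Bool) (hm : bMask string escape (cs.drop i) = mask.drop i) :
    aGo cs needle string escape i = fIdx cs needle mask i := by
  by_cases h : i < cs.length
  · have hdrop : cs.drop i = cs[i] :: cs.drop (i + 1) := List.drop_eq_getElem_cons h
    rw [hdrop] at hm
    simp only [bMask] at hm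
    rw [aGo, dif_pos h, fIdx, dif_pos h]
    simp only []
    generalize hS : (if (cs[i] == '\'' && !escape) = true then !string else string) = s' at hm ⊢
    generalize hE : (cs[i] == '\\' && !escape) = e' at hm ⊢
    have hhead : mask[i]? = some s' := by
      rw [← List.head?_drop, ← hm]; rfl
    have hget : mask.getD i true = s' := by
      simp [List.getD, hhead]
    have htail : bMask s' e' (cs.drop (i + 1)) = mask.drop (i + 1) := by
      have hc := congrArg List.tail hm
      simpa [List.tail_drop] using hc
    have ih := aGo_eq_fIdx cs needle mask (i + 1) s' e' htail
    rw [hget]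
    by_cases hstr : s' = true
    · rw [if_pos hstr, if_neg (by simp [hstr]), ih]
    · have hstr' : s' = false := by simpa using hstr
      rw [if_neg hstr]
      by_cases hsw : PySem.Chars.startswith (cs.drop i) needle = true
      · rw [if_pos hsw, if_pos ⟨hstr', (PySem.Chars.startswith_iff _ _).1 hsw⟩]
      · rw [if_neg hsw, if_neg (fun hc => hsw ((PySem.Chars.startswith_iff _ _).2 hc.2)), ih]
  · rw [aGo, dif_neg h, fIdx, dif_neg h]
termination_by cs.length - i

-- a prefix at a later index is an infix of the earlier drop
theorem prefix_drop_infix (cs needle : List Char) (p t : Nat) (hpt : p ≤ t)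
    (h : needle <+: cs.drop t) : needle <:+: cs.drop p := by
  have hd : cs.drop t = (cs.drop p).drop (t - p) := by
    rw [List.drop_drop]; congr 1; omega
  rw [hd] at h
  exact h.isInfix.trans (List.drop_suffix _ _).isInfix

-- B's loop computes fIdx.
theorem bSearch_eq_fIdx (cs needle : List Char) (mask : List Bool) (pos : Nat) :
    bSearch cs needle mask pos = fIdx cs needle mask pos := by
  by_cases hpos : pos ≤ cs.length
  · rw [bSearch, dif_pos hpos]
    by_cases hr : PySem.Chars.findFrom cs needle (pos : Int) none = -1
    · rw [dif_pos hr]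
      have hninf : ¬ needle <:+: cs.drop pos :=
        (PySem.Chars.findFrom_natCast_eq_neg_one_iff cs needle pos hpos).1 hr
      refine (fIdx_none cs needle mask pos (fun t ht hpre => ?_)).symm
      by_cases htl : t ≤ cs.length
      · exact hninf (prefix_drop_infix cs needle pos t ht hpre)
      · rw [List.drop_eq_nil_of_le (by omega)] at hpre
        have hn : needle = [] := List.prefix_nil.mp hpre
        exact hninf (by simp [hn])
    · rw [dif_neg hr]
      obtain ⟨hle, hpre, hmin⟩ := PySem.Chars.findFrom_natCast_spec cs needle pos hpos hr
      set r := PySem.Chars.findFrom cs needle (pos : Int) none with hrdef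
      have hskip : fIdx cs needle mask pos = fIdx cs needle mask r.toNat :=
        fIdx_skip_range cs needle mask pos r.toNat (by omega)
          (fun t ht1 ht2 => hmin t ht1 ht2)
      by_cases hcond : r.toNat < cs.length ∧ mask.getD r.toNat true = false
      · rw [if_pos hcond, hskip, fIdx, dif_pos hcond.1, if_pos ⟨hcond.2, hpre⟩]
      · rw [if_neg hcond, bSearch_eq_fIdx cs needle mask (r.toNat + 1), hskip]
        rcases Nat.lt_or_ge r.toNat cs.length with hl | hl
        · conv_rhs => rw [fIdx]
          rw [dif_pos hl, if_neg (fun hc => hcond ⟨hl, hc.1⟩)]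
        · conv_rhs => rw [fIdx]
          rw [dif_neg (by omega), fIdx, dif_neg (by omega)]
  · rw [bSearch, dif_neg hpos, fIdx, dif_neg (by omega)]
termination_by cs.length + 1 - pos
decreasing_by omega

-- ===== VERDICT (by name: the statement is the Claim_ definition above) =====
theorem find_token_py_spec : Claim_equal_find_token_py := by
  intro haystack needle _
  unfold Spec_find_token_py find_token_py find_token_py_alt
  rw [aGo_eq_fIdx haystack.toList needle.toList (bMask false false haystack.toList) 0 false false (by simp),
    bSearch_eq_fIdx]
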